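-- pv_equiv track=rewrite | github.com/juanlassodelavega/graph-algorithms-python | src/dfs.py | dfs
-- ===== SOURCE A (Python) =====
-- def dfs(graph, start):
--     if start not in graph:
--         raise ValueError(f"El nodo inicial '{start}' no existe en el grafo")
--
--     visited = set()
--     stack = [start]
--     order = []
--
--     while stack:
--         node = stack.pop()
--         if node in visited:
--             continue
--
--         visited.add(node)
--         order.append(node)
--
--         # Se apilan en orden inverso para respetar el orden original al desapilar.
--         for neighbor in reversed(graph.get(node, [])):
--             if neighbor not in visited:
--                 stack.append(neighbor)
--
--     return order
-- ===== SOURCE B (Python) =====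
-- def dfs(graph, start):
--     if start not in graph:
--         raise ValueError(f"El nodo inicial '{start}' no existe en el grafo")
--
--     visited = set()
--     order = []
--
--     def visit(node):
--         if node in visited:
--             return
--         visited.add(node)
--         order.append(node)
--         for neighbor in graph.get(node, []):
--             visit(neighbor)
--
--     visit(start)
--     return order
-- ===== Notes on version B (the rewrite author's own statement) =====
-- stated objective: idiomatic
-- what changed: B is the textbook recursive DFS: an inner visit function marks a node, appends it and recurses over its neighbors in forward order via the call stack, replacing A's explicit stack of nodes pushed in reverse with duplicates re-checked at pop time.
import Mathlib
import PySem

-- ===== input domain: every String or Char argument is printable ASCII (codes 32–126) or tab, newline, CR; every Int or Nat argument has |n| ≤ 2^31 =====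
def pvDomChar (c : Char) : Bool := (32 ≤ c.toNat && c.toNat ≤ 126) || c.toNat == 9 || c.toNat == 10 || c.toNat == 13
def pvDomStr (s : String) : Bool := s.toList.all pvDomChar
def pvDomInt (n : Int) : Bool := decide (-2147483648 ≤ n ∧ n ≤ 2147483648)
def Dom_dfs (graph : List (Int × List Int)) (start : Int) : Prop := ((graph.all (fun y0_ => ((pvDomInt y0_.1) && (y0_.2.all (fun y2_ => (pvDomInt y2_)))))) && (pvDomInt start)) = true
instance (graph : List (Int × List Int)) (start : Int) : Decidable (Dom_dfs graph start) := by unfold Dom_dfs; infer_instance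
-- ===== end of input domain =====

-- B is the textbook recursive DFS (inner `visit` over neighbors in forward order) instead of
-- A's explicit reversed-push node stack; objective: idiomatic, same asymptotic cost.

-- shared dict-lookup primitive: Python's graph.get(node, [])
def pvAdj (graph : List (Int × List Int)) (node : Int) : List Int :=
  ((PySem.Dict.mk graph).get? node).getD []

-- ---- termination bookkeeping (used by port A's `termination_by` and by B's fuel bound) ----
def pvUniv (graph : List (Int × List Int)) (start : Int) : List Int :=
  start :: graph.flatMap (fun p => p.1 :: p.2)

def pvK (graph : List (Int × List Int)) : Nat := (graph.map (fun p => p.2.length)).sum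

def pvU (graph : List (Int × List Int)) (start : Int) (v : List Int) : Nat :=
  ((pvUniv graph start).toFinset.filter (fun x => x ∉ v)).card

theorem pvAdj_length_le (graph : List (Int × List Int)) (n : Int) :
    (pvAdj graph n).length ≤ pvK graph := by
  induction graph with
  | nil => simp [pvAdj, PySem.Dict.get?, pvK]
  | cons p rest ih =>
    obtain ⟨k, vv⟩ := p
    simp only [pvAdj, PySem.Dict.get?_mk_cons, pvK, List.map_cons, List.sum_cons] at *
    split
    · simp only [Option.getD_some]; omega
    · omega

theorem pvAdj_of_not_key (graph : List (Int × List Int)) (n : Int)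
    (h : ∀ p ∈ graph, p.1 ≠ n) : pvAdj graph n = [] := by
  induction graph with
  | nil => simp [pvAdj, PySem.Dict.get?]
  | cons p rest ih =>
    obtain ⟨k, vv⟩ := p
    have hp : k ≠ n := h (k, vv) (by simp)
    simp only [pvAdj, PySem.Dict.get?_mk_cons, beq_iff_eq, if_neg hp] at *
    exact ih (fun q hq => h q (by simp [hq]))

theorem pvAdj_of_not_univ (graph : List (Int × List Int)) (start n : Int)
    (h : n ∉ pvUniv graph start) : pvAdj graph n = [] := by
  refine pvAdj_of_not_key graph n (fun p hp hpn => h ?_)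
  simp [pvUniv, List.mem_flatMap]
  exact Or.inr ⟨p.1, p.2, hp, Or.inl hpn.symm⟩

theorem pvU_add_lt (graph : List (Int × List Int)) (start n : Int) (v : PySem.Set Int)
    (hu : n ∈ pvUniv graph start) (hv : n ∉ v) :
    pvU graph start (v.add n) < pvU graph start v := by
  apply Finset.card_lt_card
  constructor
  · intro x hx
    simp only [Finset.mem_filter] at *
    exact ⟨hx.1, fun hxv => hx.2 (by rw [PySem.Set.mem_add]; exact Or.inl hxv)⟩
  · intro hsub
    have := hsub (by simp only [Finset.mem_filter]
                     exact ⟨List.mem_toFinset.2 hu, hv⟩)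
    simp only [Finset.mem_filter] at this
    exact this.2 (by rw [PySem.Set.mem_add]; exact Or.inr rfl)

theorem pvU_add_eq (graph : List (Int × List Int)) (start n : Int) (v : PySem.Set Int)
    (hu : n ∉ pvUniv graph start) : pvU graph start (v.add n) = pvU graph start v := by
  unfold pvU
  congr 1
  apply Finset.filter_congr
  intro x hx
  have hxu : x ∈ pvUniv graph start := List.mem_toFinset.1 hx
  have hxn : x ≠ n := fun h => hu (h ▸ hxu)
  simp [PySem.Set.mem_add, hxn]

theorem pv_contains_iff {v : PySem.Set Int} {n : Int} : v.contains n = true ↔ n ∈ v := by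
  simp [PySem.Set.contains]

theorem pv_not_mem_of_not_contains {v : PySem.Set Int} {n : Int}
    (h : ¬ v.contains n = true) : n ∉ v := fun hm => h (pv_contains_iff.2 hm)

-- ===== PORT A =====
-- The Python stack only pushes/pops at its end; it is modelled top-first (Lean list head =
-- Python stack top), which is exact: `stack.pop()` = head, and appending
-- `reversed(adj)` filtered by `not in visited` = prepending `adj.filter (∉ visited)`.
def dfsLoop (graph : List (Int × List Int)) (start : Int) (visited : PySem.Set Int)
    (stack order : List Int) : List Int :=
  match stack with
  | [] => order
  | node :: rest =>
    if visited.contains node then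
      dfsLoop graph start visited rest order
    else
      dfsLoop graph start (visited.add node)
        (((pvAdj graph node).filter (fun m => !(visited.add node).contains m)) ++ rest)
        (order ++ [node])
termination_by pvU graph start visited * (pvK graph + 1) + stack.length
decreasing_by
  · simp only [List.length_cons]; omega
  · rename_i hnv
    by_cases hu : node ∈ pvUniv graph start
    · have h1 := pvU_add_lt graph start node visited hu (pv_not_mem_of_not_contains hnv)
      have h2 : ((pvAdj graph node).filter (fun m => !(visited.add node).contains m)).length
          ≤ pvK graph := le_trans (List.length_filter_le _ _) (pvAdj_length_le graph node)
      have h3 := Nat.mul_le_mul_right (pvK graph + 1) (Nat.succ_le_of_lt h1)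
      rw [Nat.succ_mul] at h3
      simp only [List.length_append, List.length_cons]
      omega
    · have h1 := pvU_add_eq graph start node visited hu
      rw [pvAdj_of_not_univ graph start node hu]
      simp only [List.filter_nil, List.nil_append, List.length_cons, h1]
      omega

def dfs (graph : List (Int × List Int)) (start : Int) : List Int :=
  if (PySem.Dict.mk graph).contains start then
    dfsLoop graph start PySem.Set.empty [start] []
  else []   -- Python raises ValueError here; excluded by Pre_dfs

-- ===== PORT B =====
-- B's recursive `visit` threads the mutable (visited, order) pair through the calls.
-- The Nat fuel only makes the nested recursion total (it is proved large enough below);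
-- one unit is consumed per Python `visit` call or loop step.
def pvVisit (graph : List (Int × List Int)) (fuel : Nat) (todo : List Int)
    (st : PySem.Set Int × List Int) : PySem.Set Int × List Int :=
  match fuel, todo with
  | 0, _ => st
  | _, [] => st
  | fuel + 1, n :: rest =>
    if st.1.contains n then pvVisit graph fuel rest st
    else pvVisit graph fuel rest
        (pvVisit graph fuel (pvAdj graph n) (st.1.add n, st.2 ++ [n]))

def dfs_alt (graph : List (Int × List Int)) (start : Int) : List Int :=
  if (PySem.Dict.mk graph).contains start then
    (pvVisit graph ((pvUniv graph start).length * (pvK graph + 1) + 1) [start]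
      (PySem.Set.empty, [])).2
  else []   -- Python raises ValueError here; excluded by Pre_dfs

-- ===== PRECONDITION & SPEC =====
-- Pre_: Python A raises ValueError exactly when start is not a key of graph (B raises there too).
def Pre_dfs (graph : List (Int × List Int)) (start : Int) : Prop :=
  (PySem.Dict.mk graph).contains start = true
instance (graph : List (Int × List Int)) (start : Int) : Decidable (Pre_dfs graph start) := by
  unfold Pre_dfs; infer_instance

def pvWitness_dfs : (List (Int × List Int)) × Int := ([(0, [1, 2]), (1, [0]), (2, [])], 0)

def Spec_dfs (graph : List (Int × List Int)) (start : Int) (out : List Int) : Prop :=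
  out = dfs_alt graph start
instance (graph : List (Int × List Int)) (start : Int) (out : List Int) :
    Decidable (Spec_dfs graph start out) := by unfold Spec_dfs; infer_instance

-- ===== CLAIM (what is proved, stated in full; the proofs are below) =====
def Claim_equal_dfs : Prop := ∀ (graph : List (Int × List Int)) (start : Int),
  Dom_dfs graph start → Pre_dfs graph start → Spec_dfs graph start (dfs graph start)

-- ===== LEMMAS AND PROOFS =====

-- Reference loop: A's loop without the push-time visited filter, returning both visited and order.
def dfsRef (graph : List (Int × List Int)) (start : Int) (visited : PySem.Set Int)
    (stack order : List Int) : PySem.Set Int × List Int :=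
  match stack with
  | [] => (visited, order)
  | node :: rest =>
    if visited.contains node then
      dfsRef graph start visited rest order
    else
      dfsRef graph start (visited.add node) (pvAdj graph node ++ rest) (order ++ [node])
termination_by pvU graph start visited * (pvK graph + 1) + stack.length
decreasing_by
  · simp only [List.length_cons]; omega
  · rename_i hnv
    by_cases hu : node ∈ pvUniv graph start
    · have h1 := pvU_add_lt graph start node visited hu (pv_not_mem_of_not_contains hnv)
      have h2 := pvAdj_length_le graph node
      have h3 := Nat.mul_le_mul_right (pvK graph + 1) (Nat.succ_le_of_lt h1)
      rw [Nat.succ_mul] at h3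
      simp only [List.length_append, List.length_cons]
      omega
    · have h1 := pvU_add_eq graph start node visited hu
      rw [pvAdj_of_not_univ graph start node hu]
      simp only [List.nil_append, List.length_cons, h1]
      omega

theorem dfsRef_nil (graph : List (Int × List Int)) (start : Int) (v : PySem.Set Int)
    (o : List Int) : dfsRef graph start v [] o = (v, o) := by
  rw [dfsRef.eq_def]

theorem dfsRef_cons_pos (graph : List (Int × List Int)) (start n : Int) (v : PySem.Set Int)
    (rest o : List Int) (h : v.contains n = true) :
    dfsRef graph start v (n :: rest) o = dfsRef graph start v rest o := by
  rw [dfsRef.eq_def]; simp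
  intro hn; exact absurd (pv_contains_iff.1 h) hn

theorem dfsRef_cons_neg (graph : List (Int × List Int)) (start n : Int) (v : PySem.Set Int)
    (rest o : List Int) (h : ¬ v.contains n = true) :
    dfsRef graph start v (n :: rest) o
      = dfsRef graph start (v.add n) (pvAdj graph n ++ rest) (o ++ [n]) := by
  rw [dfsRef.eq_def]; simp
  intro hn; exact absurd hn (pv_not_mem_of_not_contains h)

theorem dfsLoop_nil (graph : List (Int × List Int)) (start : Int) (v : PySem.Set Int)
    (o : List Int) : dfsLoop graph start v [] o = o := by
  rw [dfsLoop.eq_def]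

theorem dfsLoop_cons_pos (graph : List (Int × List Int)) (start n : Int) (v : PySem.Set Int)
    (rest o : List Int) (h : v.contains n = true) :
    dfsLoop graph start v (n :: rest) o = dfsLoop graph start v rest o := by
  rw [dfsLoop.eq_def]; simp
  intro hn; exact absurd (pv_contains_iff.1 h) hn

theorem dfsLoop_cons_neg (graph : List (Int × List Int)) (start n : Int) (v : PySem.Set Int)
    (rest o : List Int) (h : ¬ v.contains n = true) :
    dfsLoop graph start v (n :: rest) o
      = dfsLoop graph start (v.add n)
          (((pvAdj graph n).filter (fun m => !(v.add n).contains m)) ++ rest) (o ++ [n]) := by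
  rw [dfsLoop.eq_def]; simp
  intro hn; exact absurd hn (pv_not_mem_of_not_contains h)

-- visited elements may be deleted anywhere in the pending stack
theorem dfsRef_skip (graph : List (Int × List Int)) (start m : Int) :
    ∀ (N : Nat) (v : PySem.Set Int) (xs : List Int),
      pvU graph start v * (pvK graph + 1) + xs.length ≤ N → m ∈ v →
      ∀ (ys o : List Int),
        dfsRef graph start v (xs ++ m :: ys) o = dfsRef graph start v (xs ++ ys) o := by
  intro N
  induction N with
  | zero =>
    intro v xs hle hm ys o
    have hxs : xs = [] := List.length_eq_zero_iff.1 (by omega)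
    subst hxs
    try simp only [List.nil_append]
    rw [dfsRef_cons_pos graph start m v ys o (pv_contains_iff.2 hm)]
  | succ N ih =>
    intro v xs hle hm ys o
    match xs with
    | [] =>
      try simp only [List.nil_append]
      rw [dfsRef_cons_pos graph start m v ys o (pv_contains_iff.2 hm)]
    | a :: xs' =>
      simp only [List.cons_append]
      by_cases ha : v.contains a = true
      · rw [dfsRef_cons_pos graph start a v _ o ha, dfsRef_cons_pos graph start a v _ o ha]
        exact ih v xs' (by simp only [List.length_cons] at hle; omega) hm ys o
      · rw [dfsRef_cons_neg graph start a v _ o ha, dfsRef_cons_neg graph start a v _ o ha]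
        have hm' : m ∈ v.add a := (PySem.Set.mem_add v a m).2 (Or.inl hm)
        rw [show pvAdj graph a ++ (xs' ++ m :: ys) = (pvAdj graph a ++ xs') ++ m :: ys by
              simp [List.append_assoc],
            show pvAdj graph a ++ (xs' ++ ys) = (pvAdj graph a ++ xs') ++ ys by
              simp [List.append_assoc]]
        apply ih (v.add a) (pvAdj graph a ++ xs') ?_ hm' ys (o ++ [a])
        by_cases hu : a ∈ pvUniv graph start
        · have h1 := pvU_add_lt graph start a v hu (pv_not_mem_of_not_contains ha)
          have h2 := pvAdj_length_le graph a
          have h3 := Nat.mul_le_mul_right (pvK graph + 1) (Nat.succ_le_of_lt h1)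
          rw [Nat.succ_mul] at h3
          simp only [List.length_append, List.length_cons] at *
          omega
        · have h1 := pvU_add_eq graph start a v hu
          rw [pvAdj_of_not_univ graph start a hu]
          simp only [List.nil_append, List.length_cons, h1] at *
          omega

-- push-time filtering against the current visited set is irrelevant
theorem dfsRef_filter (graph : List (Int × List Int)) (start : Int) (v : PySem.Set Int) :
    ∀ (ys xs r o : List Int),
      dfsRef graph start v (xs ++ ys.filter (fun y => !v.contains y) ++ r) o
        = dfsRef graph start v (xs ++ ys ++ r) o := by
  intro ys
  induction ys with
  | nil => intro xs r o; simp
  | cons y ys ih =>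
    intro xs r o
    by_cases hy : v.contains y = true
    · have h1 : (y :: ys).filter (fun y => !v.contains y) = ys.filter (fun y => !v.contains y) := by
        simp [pv_contains_iff.1 hy]
      rw [h1, ih xs r o,
          show xs ++ (y :: ys) ++ r = xs ++ y :: (ys ++ r) by simp,
          dfsRef_skip graph start y _ v xs le_rfl (pv_contains_iff.1 hy) (ys ++ r) o]
      simp
    · have h1 : (y :: ys).filter (fun y => !v.contains y) = y :: ys.filter (fun y => !v.contains y) := by
        simp [pv_not_mem_of_not_contains hy]
      rw [h1,
          show xs ++ (y :: ys.filter (fun y => !v.contains y)) ++ r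
              = (xs ++ [y]) ++ ys.filter (fun y => !v.contains y) ++ r by simp,
          ih (xs ++ [y]) r o]
      simp

theorem dfsLoop_eq_ref (graph : List (Int × List Int)) (start : Int) :
    ∀ (v : PySem.Set Int) (stack order : List Int),
      dfsLoop graph start v stack order = (dfsRef graph start v stack order).2 := by
  intro v stack order
  induction v, stack, order using dfsLoop.induct graph start with
  | case1 visited order => rw [dfsLoop_nil, dfsRef_nil]
  | case2 visited order node rest h ih =>
    rw [dfsLoop_cons_pos graph start node visited rest _ h,
        dfsRef_cons_pos graph start node visited rest _ h]
    exact ih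
  | case3 visited order node rest h ih =>
    rw [dfsLoop_cons_neg graph start node visited rest _ h,
        dfsRef_cons_neg graph start node visited rest _ h, ih]
    have h2 := dfsRef_filter graph start (visited.add node) (pvAdj graph node) [] rest (order ++ [node])
    simp only [List.nil_append] at h2
    exact congrArg Prod.snd h2

-- processing a concatenated stack = processing the pieces in sequence
theorem dfsRef_append (graph : List (Int × List Int)) (start : Int) :
    ∀ (v : PySem.Set Int) (xs o : List Int), ∀ ys,
      dfsRef graph start v (xs ++ ys) o
        = dfsRef graph start (dfsRef graph start v xs o).1 ys (dfsRef graph start v xs o).2 := by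
  intro v xs o
  induction v, xs, o using dfsRef.induct graph start with
  | case1 visited order => intro ys; rw [dfsRef_nil]; simp
  | case2 visited order node rest h ih =>
    intro ys
    rw [List.cons_append, dfsRef_cons_pos graph start node visited _ _ h,
        dfsRef_cons_pos graph start node visited rest _ h]
    exact ih ys
  | case3 visited order node rest h ih =>
    intro ys
    rw [List.cons_append, dfsRef_cons_neg graph start node visited _ _ h,
        dfsRef_cons_neg graph start node visited rest _ h, ← List.append_assoc]
    exact ih ys

-- dfsRef only ever grows the visited set
theorem dfsRef_subset (graph : List (Int × List Int)) (start : Int) :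
    ∀ (v : PySem.Set Int) (s o : List Int) (x : Int),
      x ∈ v → x ∈ (dfsRef graph start v s o).1 := by
  intro v s o
  induction v, s, o using dfsRef.induct graph start with
  | case1 visited order => intro x hx; rw [dfsRef_nil]; exact hx
  | case2 visited order node rest h ih =>
    intro x hx; rw [dfsRef_cons_pos graph start node visited rest _ h]; exact ih x hx
  | case3 visited order node rest h ih =>
    intro x hx
    rw [dfsRef_cons_neg graph start node visited rest _ h]
    exact ih x ((PySem.Set.mem_add visited node x).2 (Or.inl hx))

theorem pvU_mono (graph : List (Int × List Int)) (start : Int) (v w : PySem.Set Int)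
    (h : ∀ x, x ∈ v → x ∈ w) : pvU graph start w ≤ pvU graph start v := by
  apply Finset.card_le_card
  intro x hx
  simp only [Finset.mem_filter] at *
  exact ⟨hx.1, fun hxv => hx.2 (h x hxv)⟩

theorem pvU_le_len (graph : List (Int × List Int)) (start : Int) (v : PySem.Set Int) :
    pvU graph start v ≤ (pvUniv graph start).length :=
  le_trans (Finset.card_filter_le _ _) (pvUniv graph start).toFinset_card_le

theorem pvVisit_succ (graph : List (Int × List Int)) (fuel : Nat) (n : Int)
    (rest : List Int) (st : PySem.Set Int × List Int) :
    pvVisit graph (fuel + 1) (n :: rest) st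
      = if st.1.contains n then pvVisit graph fuel rest st
        else pvVisit graph fuel rest
          (pvVisit graph fuel (pvAdj graph n) (st.1.add n, st.2 ++ [n])) := rfl

-- with enough fuel, B's recursive visit computes exactly the reference loop
theorem pvVisit_eq_ref (graph : List (Int × List Int)) (start : Int) :
    ∀ (fuel : Nat) (v : PySem.Set Int) (todo o : List Int),
      pvU graph start v * (pvK graph + 1) + todo.length ≤ fuel →
      pvVisit graph fuel todo (v, o) = dfsRef graph start v todo o := by
  intro fuel
  induction fuel with
  | zero =>
    intro v todo o hle
    have : todo = [] := List.length_eq_zero_iff.1 (by omega)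
    subst this
    rw [dfsRef_nil]; rfl
  | succ fuel ih =>
    intro v todo o hle
    match todo with
    | [] => rw [dfsRef_nil]; rfl
    | n :: rest =>
      by_cases hn : v.contains n = true
      · rw [pvVisit_succ, if_pos hn, dfsRef_cons_pos graph start n v rest o hn]
        exact ih v rest o (by simp only [List.length_cons] at hle; omega)
      · have hstep : pvVisit graph (fuel + 1) (n :: rest) (v, o)
            = pvVisit graph fuel rest
                (pvVisit graph fuel (pvAdj graph n) (v.add n, o ++ [n])) := by
          rw [pvVisit_succ, if_neg hn]
        -- fuel bound for the inner (neighbor) call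
        have hKadj := pvAdj_length_le graph n
        have hinner : pvU graph start (v.add n) * (pvK graph + 1)
              + (pvAdj graph n).length ≤ fuel := by
          by_cases hu : n ∈ pvUniv graph start
          · have h1 := pvU_add_lt graph start n v hu (pv_not_mem_of_not_contains hn)
            have h3 := Nat.mul_le_mul_right (pvK graph + 1) (Nat.succ_le_of_lt h1)
            rw [Nat.succ_mul] at h3
            simp only [List.length_cons] at hle
            omega
          · have h1 := pvU_add_eq graph start n v hu
            rw [pvAdj_of_not_univ graph start n hu, h1]
            simp only [List.length_nil, List.length_cons] at *
            omega
        rw [hstep, ih (v.add n) (pvAdj graph n) (o ++ [n]) hinner]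
        -- fuel bound for the outer (siblings) call
        have hsub := dfsRef_subset graph start (v.add n) (pvAdj graph n) (o ++ [n])
        have hmono := pvU_mono graph start (v.add n)
            (dfsRef graph start (v.add n) (pvAdj graph n) (o ++ [n])).1
            (fun x hx => hsub x hx)
        have houter : pvU graph start
              (dfsRef graph start (v.add n) (pvAdj graph n) (o ++ [n])).1 * (pvK graph + 1)
              + rest.length ≤ fuel := by
          by_cases hu : n ∈ pvUniv graph start
          · have h1 := pvU_add_lt graph start n v hu (pv_not_mem_of_not_contains hn)
            have h2 : pvU graph start
                  (dfsRef graph start (v.add n) (pvAdj graph n) (o ++ [n])).1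
                  ≤ pvU graph start (v.add n) := hmono
            have h3 := Nat.mul_le_mul_right (pvK graph + 1)
              (le_trans h2 (Nat.le_of_lt_succ (Nat.lt_succ_of_lt h1)))
            have h4 := Nat.mul_le_mul_right (pvK graph + 1) (Nat.succ_le_of_lt h1)
            rw [Nat.succ_mul] at h4
            have h5 := Nat.mul_le_mul_right (pvK graph + 1) h2
            simp only [List.length_cons] at hle
            have h6 := Nat.mul_le_mul_right (pvK graph + 1) (Nat.le_of_lt h1)
            omega
          · have h1 := pvU_add_eq graph start n v hu
            have h2 : pvU graph start
                  (dfsRef graph start (v.add n) (pvAdj graph n) (o ++ [n])).1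
                  ≤ pvU graph start v := h1 ▸ hmono
            have h5 := Nat.mul_le_mul_right (pvK graph + 1) h2
            simp only [List.length_cons] at hle
            omega
        rw [ih _ rest _ houter]
        have := dfsRef_append graph start (v.add n) (pvAdj graph n) (o ++ [n]) rest
        rw [dfsRef_cons_neg graph start n v rest o hn, this]

-- ===== VERDICT (by name: the statement is the Claim_ definition above) =====
theorem dfs_spec : Claim_equal_dfs := by
  intro graph start _ hpre
  unfold Pre_dfs at hpre
  unfold Spec_dfs dfs dfs_alt
  rw [if_pos hpre, if_pos hpre, dfsLoop_eq_ref,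
      pvVisit_eq_ref graph start _ PySem.Set.empty [start] []
        (by
          have h1 := pvU_le_len graph start PySem.Set.empty
          have h2 := Nat.mul_le_mul_right (pvK graph + 1) h1
          simp only [List.length_cons, List.length_nil]
          omega)]
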